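-- pv_equiv track=rewrite | github.com/klauskullolli/python_lessons | exercises/magic-boxes/magic.py | find_box
-- ===== SOURCE A (Python) =====
-- def find_box(boxes, obj):
--     for index, box in enumerate(boxes):
--         if obj in box:
--             return index
--     for index, box in enumerate(boxes):
--         if not box:
--             return index
--     return None
-- ===== SOURCE B (Python) =====
-- def find_box(boxes, obj):
--     first_empty = None
--     for index, box in enumerate(boxes):
--         if obj in box:
--             return index
--         if first_empty is None and not box:
--             first_empty = index
--     return first_empty
-- ===== Notes on version B (the rewrite author's own statement) =====
-- stated objective: simpler
-- what changed: B merges A's two sequential scans into one pass that returns immediately on a containing box and records (but does not return) the first empty box's index, returned only after the scan fails.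
import Mathlib
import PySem

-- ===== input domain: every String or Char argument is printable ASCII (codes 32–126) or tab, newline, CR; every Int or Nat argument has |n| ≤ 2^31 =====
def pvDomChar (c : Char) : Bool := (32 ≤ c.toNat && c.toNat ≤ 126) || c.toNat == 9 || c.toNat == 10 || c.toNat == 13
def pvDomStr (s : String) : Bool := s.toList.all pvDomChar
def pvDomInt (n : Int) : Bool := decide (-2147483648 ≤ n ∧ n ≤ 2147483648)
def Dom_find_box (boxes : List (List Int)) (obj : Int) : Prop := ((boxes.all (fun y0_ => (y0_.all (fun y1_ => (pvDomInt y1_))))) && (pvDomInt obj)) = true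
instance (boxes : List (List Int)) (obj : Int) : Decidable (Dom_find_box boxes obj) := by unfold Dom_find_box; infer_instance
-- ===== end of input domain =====

-- B does one pass recording the first empty box instead of A's two sequential scans (objective: simpler).

-- ===== PORT A =====
-- first loop: return index of the first box containing obj
def find_box_loop1 (boxes : List (List Int)) (obj : Int) (index : Int) : Option Int :=
  match boxes with
  | [] => none
  | box :: rest => if box.contains obj then some index else find_box_loop1 rest obj (index + 1)

-- second loop: return index of the first empty box
def find_box_loop2 (boxes : List (List Int)) (index : Int) : Option Int :=
  match boxes with
  | [] => none
  | box :: rest => if box = [] then some index else find_box_loop2 rest (index + 1)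

def find_box (boxes : List (List Int)) (obj : Int) : Option Int :=
  match find_box_loop1 boxes obj 0 with
  | some i => some i
  | none => find_box_loop2 boxes 0

-- ===== PORT B =====
-- single pass carrying the recorded first-empty index
def find_box_alt_loop (boxes : List (List Int)) (obj : Int) (index : Int) (firstEmpty : Option Int) : Option Int :=
  match boxes with
  | [] => firstEmpty
  | box :: rest =>
    if box.contains obj then some index
    else find_box_alt_loop rest obj (index + 1)
      (if firstEmpty = none ∧ box = [] then some index else firstEmpty)

def find_box_alt (boxes : List (List Int)) (obj : Int) : Option Int :=
  find_box_alt_loop boxes obj 0 none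

-- ===== PRECONDITION & SPEC =====
def Spec_find_box (boxes : List (List Int)) (obj : Int) (out : Option Int) : Prop := out = find_box_alt boxes obj
instance (boxes : List (List Int)) (obj : Int) (out : Option Int) : Decidable (Spec_find_box boxes obj out) := by unfold Spec_find_box; infer_instance

-- ===== CLAIM (what is proved, stated in full; the proofs are below) =====
def Claim_equal_find_box : Prop := ∀ (boxes : List (List Int)) (obj : Int), Dom_find_box boxes obj → Spec_find_box boxes obj (find_box boxes obj)

-- ===== LEMMAS AND PROOFS =====
lemma find_box_alt_loop_eq (boxes : List (List Int)) (obj : Int) :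
    ∀ (index : Int) (firstEmpty : Option Int),
      find_box_alt_loop boxes obj index firstEmpty =
        match find_box_loop1 boxes obj index, firstEmpty with
        | some j, _ => some j
        | none, some k => some k
        | none, none => find_box_loop2 boxes index := by
  induction boxes with
  | nil => intro index firstEmpty; cases firstEmpty <;> simp [find_box_alt_loop, find_box_loop1, find_box_loop2]
  | cons box rest ih =>
    intro index firstEmpty
    by_cases hc : obj ∈ box
    · simp [find_box_alt_loop, find_box_loop1, hc]
    · cases firstEmpty with
      | some k =>
        simp only [find_box_alt_loop, find_box_loop1, List.contains_eq_mem, decide_eq_true_eq,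
          hc, if_false, reduceCtorEq, false_and, ih]
        cases find_box_loop1 rest obj (index + 1) <;> rfl
      | none =>
        by_cases he : box = ([] : List Int)
        · simp only [find_box_alt_loop, find_box_loop1, find_box_loop2, List.contains_eq_mem,
            decide_eq_true_eq, he, and_self, if_pos, ih]
          cases find_box_loop1 rest obj (index + 1) <;> rfl
        · simp only [find_box_alt_loop, find_box_loop1, find_box_loop2, List.contains_eq_mem,
            decide_eq_true_eq, hc, if_false, he, and_false, ih]

-- ===== VERDICT (by name: the statement is the Claim_ definition above) =====
theorem find_box_spec : Claim_equal_find_box := by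
  intro boxes obj _
  unfold Spec_find_box find_box find_box_alt
  rw [find_box_alt_loop_eq]
  cases find_box_loop1 boxes obj 0 <;> rfl
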